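-- pv_equiv track=rewrite | github.com/microsoft/nnfusion | artifacts/roller/utils/commons.py | alloc_configs_for_subprocess
-- ===== SOURCE A (Python) =====
-- def alloc_configs_for_subprocess(parallel, configs_num):
--     num_process = [int(configs_num // parallel) + 1 for i in range(configs_num % parallel)]
--     num_process = num_process + [int(configs_num // parallel) for i in range(parallel - configs_num % parallel)]
--     idx = 0
--     process_idx = [0]
--     for num in num_process:
--         process_idx.append(idx + num)
--         idx += num
--     return process_idx
-- ===== SOURCE B (Python) =====
-- def alloc_configs_for_subprocess(parallel, configs_num):
--     q = configs_num // parallel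
--     r = configs_num % parallel
--     return [0] + [i * q + min(i, r) for i in range(1, parallel + 1)]
-- ===== Notes on version B (the rewrite author's own statement) =====
-- stated objective: simpler
-- what changed: Replaces the per-process count list plus explicit prefix-sum accumulation loop with the direct closed-form boundary i*q + min(i, r) evaluated per index after the fixed leading 0.
import Mathlib
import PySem

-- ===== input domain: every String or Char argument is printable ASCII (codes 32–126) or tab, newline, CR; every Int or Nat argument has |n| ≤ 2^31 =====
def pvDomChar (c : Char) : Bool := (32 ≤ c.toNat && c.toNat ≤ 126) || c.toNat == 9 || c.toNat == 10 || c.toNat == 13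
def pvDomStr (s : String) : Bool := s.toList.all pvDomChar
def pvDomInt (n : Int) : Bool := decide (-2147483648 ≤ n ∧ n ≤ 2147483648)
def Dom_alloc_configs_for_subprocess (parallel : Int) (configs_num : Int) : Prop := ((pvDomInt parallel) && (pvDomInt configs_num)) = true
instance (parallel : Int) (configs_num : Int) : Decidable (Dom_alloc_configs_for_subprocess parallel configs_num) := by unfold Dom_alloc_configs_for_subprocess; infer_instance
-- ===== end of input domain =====

-- B replaces A's count-list + prefix-sum loop with the leading 0 followed by the
-- closed-form boundary i*q + min(i, r) per index (objective: simpler).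

-- ===== PORT A =====
-- num_process = counts comprehensions; then idx = 0; process_idx = [0];
-- for num in num_process: process_idx.append(idx + num); idx += num.
def alloc_configs_for_subprocess (parallel : Int) (configs_num : Int) : List Int :=
  (((PySem.List.pyRange 0 (PySem.Int.mod configs_num parallel) 1).map
      (fun _ => PySem.Int.floordiv configs_num parallel + 1) ++
    (PySem.List.pyRange 0 (parallel - PySem.Int.mod configs_num parallel) 1).map
      (fun _ => PySem.Int.floordiv configs_num parallel)).foldl
      (fun (st : Int × List Int) num => (st.1 + num, st.2 ++ [st.1 + num]))
      ((0 : Int), ([0] : List Int))).2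

-- ===== PORT B =====
-- q = configs_num // parallel; r = configs_num % parallel;
-- [0] + [i * q + min(i, r) for i in range(1, parallel + 1)]
def alloc_configs_for_subprocess_alt (parallel : Int) (configs_num : Int) : List Int :=
  ([0] : List Int) ++
    (PySem.List.pyRange 1 (parallel + 1) 1).map
      (fun i => i * PySem.Int.floordiv configs_num parallel
                  + min i (PySem.Int.mod configs_num parallel))

-- ===== PRECONDITION & SPEC =====
-- Pre_ excludes only parallel == 0, on which A raises ZeroDivisionError.
def Pre_alloc_configs_for_subprocess (parallel : Int) (configs_num : Int) : Prop := parallel ≠ 0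
instance (parallel : Int) (configs_num : Int) : Decidable (Pre_alloc_configs_for_subprocess parallel configs_num) := by unfold Pre_alloc_configs_for_subprocess; infer_instance

def pvWitness_alloc_configs_for_subprocess : Int × Int := (3, 7)

def Spec_alloc_configs_for_subprocess (parallel : Int) (configs_num : Int) (out : List Int) : Prop := out = alloc_configs_for_subprocess_alt parallel configs_num
instance (parallel : Int) (configs_num : Int) (out : List Int) : Decidable (Spec_alloc_configs_for_subprocess parallel configs_num out) := by unfold Spec_alloc_configs_for_subprocess; infer_instance

-- ===== CLAIM (what is proved, stated in full; the proofs are below) =====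
def Claim_equal_alloc_configs_for_subprocess : Prop := ∀ (parallel : Int) (configs_num : Int), Dom_alloc_configs_for_subprocess parallel configs_num → Pre_alloc_configs_for_subprocess parallel configs_num → Spec_alloc_configs_for_subprocess parallel configs_num (alloc_configs_for_subprocess parallel configs_num)

-- ===== LEMMAS AND PROOFS =====

-- A's comprehensions build constant lists.
theorem pv_map_const_pyRange (n v : Int) :
    (PySem.List.pyRange 0 n 1).map (fun _ => v) = List.replicate n.toNat v := by
  rw [PySem.List.pyRange_one, List.map_map]
  show (List.range (n - 0).toNat).map (fun _ => v) = _
  rw [List.map_const', List.length_range, sub_zero]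

-- A's prefix-sum loop over a constant list, in closed form.
theorem pv_foldl_replicate (n : Nat) (c : Int) :
    ∀ (idx : Int) (acc : List Int),
    (List.replicate n c).foldl (fun (st : Int × List Int) num => (st.1 + num, st.2 ++ [st.1 + num])) (idx, acc)
      = (idx + n * c, acc ++ (List.range n).map (fun k : Nat => idx + ((k : Int) + 1) * c)) := by
  induction n with
  | zero => intro idx acc; simp
  | succ m ih =>
      intro idx acc
      rw [List.replicate_succ, List.foldl_cons, ih, List.range_succ_eq_map]
      simp only [Prod.mk.injEq, List.map_cons, List.map_map, List.append_assoc,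
        List.cons_append, List.nil_append, Nat.cast_zero]
      refine ⟨by push_cast; ring, ?_⟩
      congr 1
      congr 1
      · ring
      · apply List.map_congr_left
        intro k _
        simp only [Function.comp_apply]
        push_cast; ring

-- The closed-form boundaries for i = 1 .. r'+s' split into the two arithmetic
-- progressions A's prefix sums produce.
theorem pv_closed_form_split (r' s' : Nat) (q : Int) :
    (List.range (r' + s')).map (fun k : Nat => ((1 : Int) + (k : Int)) * q + min ((1 : Int) + (k : Int)) (r' : Int))
      = (List.range r').map (fun k : Nat => ((k : Int) + 1) * (q + 1))
          ++ (List.range s').map (fun k : Nat => (r' : Int) * (q + 1) + ((k : Int) + 1) * q) := by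
  rw [List.range_add, List.map_append, List.map_map]
  congr 1
  · apply List.map_congr_left
    intro k hk
    rw [List.mem_range] at hk
    have hmin : min ((1 : Int) + (k : Int)) (r' : Int) = (1 : Int) + (k : Int) := by
      apply min_eq_left; omega
    rw [hmin]; ring
  · apply List.map_congr_left
    intro k _
    simp only [Function.comp_apply]
    have hmin : min ((1 : Int) + ((r' + k : Nat) : Int)) (r' : Int) = (r' : Int) := by
      apply min_eq_right; push_cast; omega
    rw [hmin]; push_cast; ring

-- ===== VERDICT (by name: the statement is the Claim_ definition above) =====
theorem alloc_configs_for_subprocess_spec : Claim_equal_alloc_configs_for_subprocess := by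
  intro p c _ hp
  unfold Spec_alloc_configs_for_subprocess alloc_configs_for_subprocess alloc_configs_for_subprocess_alt
  set q := PySem.Int.floordiv c p with hq
  set r := PySem.Int.mod c p with hr
  rcases lt_or_gt_of_ne hp with hneg | hpos
  · -- parallel < 0: both ranges of A are empty, B's range(1, parallel+1) is empty.
    have hb := PySem.Int.mod_neg_bounds c hneg
    rw [PySem.List.pyRange_one_eq_nil (by omega : r ≤ 0),
        PySem.List.pyRange_one_eq_nil (by omega : p - r ≤ 0),
        PySem.List.pyRange_one_eq_nil (by omega : p + 1 ≤ 1)]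
    simp
  · -- parallel > 0
    have hrem : r = c % p := by rw [hr, PySem.Int.mod_eq_emod_of_pos hpos]
    have hr0 : 0 ≤ r := by rw [hrem]; exact Int.emod_nonneg c (by omega)
    have hrp : r < p := by rw [hrem]; exact Int.emod_lt_of_pos c hpos
    have hrt : (r.toNat : Int) = r := Int.toNat_of_nonneg hr0
    have hsum : r.toNat + (p - r).toNat = (p + 1 - 1).toNat := by omega
    rw [pv_map_const_pyRange, pv_map_const_pyRange, List.foldl_append,
        pv_foldl_replicate, pv_foldl_replicate, PySem.List.pyRange_one, List.map_map]
    have hmap :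
        (List.range (p + 1 - 1).toNat).map ((fun i => i * q + min i r) ∘ fun k : Nat => (1 : Int) + (k : Nat))
          = (List.range (r.toNat + (p - r).toNat)).map
              (fun k : Nat => ((1 : Int) + (k : Int)) * q + min ((1 : Int) + (k : Int)) (r.toNat : Int)) := by
      rw [hsum]
      apply List.map_congr_left
      intro k _
      simp [Function.comp, hrt]
    rw [hmap, pv_closed_form_split]
    simp [zero_add]
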